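-- pv_equiv track=rewrite | github.com/thevibethinker/n5os-ode | N5/scripts/resonance/pattern_surfacer.py | classify_ideas
-- ===== SOURCE A (Python) =====
-- from typing import Dict, List, Any, Optional, Tuple
--
-- THRESHOLDS = {
--     "cornerstone": 10,  # L0: 10+ meetings
--     "active_thesis": 4,  # L1: 4-9 meetings
--     "recurring_tool": 2,  # L2: 2-3 meetings
--     # L3 Spark: 1 meeting (implicit)
-- }
--
-- def classify_ideas(ideas: Dict[str, Dict]) -> Dict[str, List]:
--     """Classify ideas into resonance levels."""
--     classified = {
--         "cornerstones": [],      # L0: 10+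
--         "active_theses": [],     # L1: 4-9
--         "recurring_tools": [],   # L2: 2-3
--         "sparks": []             # L3: 1
--     }
--
--     for idea_slug, data in ideas.items():
--         freq = data["frequency"]
--
--         if freq >= THRESHOLDS["cornerstone"]:
--             classified["cornerstones"].append(data)
--         elif freq >= THRESHOLDS["active_thesis"]:
--             classified["active_theses"].append(data)
--         elif freq >= THRESHOLDS["recurring_tool"]:
--             classified["recurring_tools"].append(data)
--         else:
--             classified["sparks"].append(data)
--
--     # Sort each category by frequency descending
--     for key in classified:
--         classified[key] = sorted(classified[key], key=lambda x: -x["frequency"])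
--
--     return classified
-- ===== SOURCE B (Python) =====
-- # B: sort the value list once (stable, key -frequency), then produce each bucket
-- # as a filter comprehension over the sorted list; stability makes each bucket
-- # already descending, so no per-bucket sort and no accumulator loop is needed.
-- def classify_ideas(ideas):
--     vals = sorted(ideas.values(), key=lambda x: -x["frequency"])
--     return {
--         "cornerstones": [d for d in vals if d["frequency"] >= 10],
--         "active_theses": [d for d in vals if 4 <= d["frequency"] < 10],
--         "recurring_tools": [d for d in vals if 2 <= d["frequency"] < 4],
--         "sparks": [d for d in vals if d["frequency"] < 2],
--     }
-- ===== Notes on version B (the rewrite author's own statement) =====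
-- stated objective: alternative
-- what changed: B sorts the whole value list once (stable, key -frequency) and then builds each bucket by a filter comprehension over the sorted list, instead of A's accumulator bucketing loop followed by four per-bucket sorts.
import Mathlib
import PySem

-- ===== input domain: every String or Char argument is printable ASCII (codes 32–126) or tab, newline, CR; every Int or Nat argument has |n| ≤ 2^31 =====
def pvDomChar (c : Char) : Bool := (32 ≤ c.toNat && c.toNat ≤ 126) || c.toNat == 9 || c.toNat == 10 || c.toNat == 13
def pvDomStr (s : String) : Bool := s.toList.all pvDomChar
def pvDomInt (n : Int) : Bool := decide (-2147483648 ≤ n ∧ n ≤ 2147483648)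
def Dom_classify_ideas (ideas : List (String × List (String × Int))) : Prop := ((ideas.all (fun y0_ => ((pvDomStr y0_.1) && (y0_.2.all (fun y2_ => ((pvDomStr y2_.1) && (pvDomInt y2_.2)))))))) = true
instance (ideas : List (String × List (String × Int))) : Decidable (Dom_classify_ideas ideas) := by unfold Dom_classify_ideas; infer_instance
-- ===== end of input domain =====

-- B sorts the value list once (stable, key -frequency) and builds each bucket as a filter
-- over the sorted list; A buckets with an accumulator loop and then sorts each bucket.
-- Return values proved equal on Pre_ (every data dict has a "frequency" key).

-- ===== PORT A =====
-- data["frequency"] (first match; none = KeyError, excluded by Pre_)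
def pvFreq? (data : List (String × Int)) : Option Int := (PySem.Dict.mk data).get? "frequency"

-- sort key  lambda x: -x["frequency"]  (on Pre_ the key is always present; 0 is never read)
def pvKey (data : List (String × Int)) : Int := -((PySem.Dict.mk data).getD "frequency" 0)

-- one step of A's classification loop; the fixed-4-key dict `classified` is the 4-tuple
-- (cornerstones, active_theses, recurring_tools, sparks)
def pvStep (c : List (List (String × Int)) × List (List (String × Int)) × List (List (String × Int)) × List (List (String × Int)))
    (data : List (String × Int)) :
    List (List (String × Int)) × List (List (String × Int)) × List (List (String × Int)) × List (List (String × Int)) :=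
  match pvFreq? data with
  | none => c          -- Python raises KeyError here; such inputs are outside Pre_
  | some freq =>
    if freq ≥ 10 then (c.1 ++ [data], c.2.1, c.2.2.1, c.2.2.2)
    else if freq ≥ 4 then (c.1, c.2.1 ++ [data], c.2.2.1, c.2.2.2)
    else if freq ≥ 2 then (c.1, c.2.1, c.2.2.1 ++ [data], c.2.2.2)
    else (c.1, c.2.1, c.2.2.1, c.2.2.2 ++ [data])

def classify_ideas (ideas : List (String × List (String × Int))) : List (String × List (List (String × Int))) :=
  let c := ideas.foldl (fun c p => pvStep c p.2) ([], [], [], [])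
  -- for key in classified: classified[key] = sorted(classified[key], key=lambda x: -x["frequency"])
  [("cornerstones", PySem.List.sorted c.1 pvKey false),
   ("active_theses", PySem.List.sorted c.2.1 pvKey false),
   ("recurring_tools", PySem.List.sorted c.2.2.1 pvKey false),
   ("sparks", PySem.List.sorted c.2.2.2 pvKey false)]

-- ===== PORT B =====
-- d["frequency"] in B's comprehensions (on Pre_ the key is always present; 0 is never read)
def bFreq (d : List (String × Int)) : Int := (PySem.Dict.mk d).getD "frequency" 0

def classify_ideas_alt (ideas : List (String × List (String × Int))) : List (String × List (List (String × Int))) :=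
  let vals := PySem.List.sorted (ideas.map (·.2)) (fun x => -(bFreq x)) false
  [("cornerstones", vals.filter (fun d => decide (bFreq d ≥ 10))),
   ("active_theses", vals.filter (fun d => decide (4 ≤ bFreq d ∧ bFreq d < 10))),
   ("recurring_tools", vals.filter (fun d => decide (2 ≤ bFreq d ∧ bFreq d < 4))),
   ("sparks", vals.filter (fun d => decide (bFreq d < 2)))]

-- ===== PRECONDITION & SPEC =====
-- Pre_: every idea's data dict has a "frequency" key; otherwise Python A raises KeyError.
def Pre_classify_ideas (ideas : List (String × List (String × Int))) : Prop :=
  (ideas.all (fun p => (pvFreq? p.2).isSome)) = true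
instance (ideas : List (String × List (String × Int))) : Decidable (Pre_classify_ideas ideas) := by unfold Pre_classify_ideas; infer_instance

def pvWitness_classify_ideas : (List (String × List (String × Int))) :=
  [("a", [("frequency", 12)]), ("b", [("frequency", 3)]), ("c", [("frequency", 1)])]

def Spec_classify_ideas (ideas : List (String × List (String × Int))) (out : List (String × List (List (String × Int)))) : Prop := out = classify_ideas_alt ideas
instance (ideas : List (String × List (String × Int))) (out : List (String × List (List (String × Int)))) : Decidable (Spec_classify_ideas ideas out) := by unfold Spec_classify_ideas; infer_instance

-- ===== CLAIM (what is proved, stated in full; the proofs are below) =====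
def Claim_equal_classify_ideas : Prop := ∀ (ideas : List (String × List (String × Int))), Dom_classify_ideas ideas → Pre_classify_ideas ideas → Spec_classify_ideas ideas (classify_ideas ideas)

-- ===== LEMMAS AND PROOFS =====

-- A's four bucket predicates (the branch taken by pvStep)
def pvP0 (d : List (String × Int)) : Bool := match pvFreq? d with | none => false | some f => f ≥ 10
def pvP1 (d : List (String × Int)) : Bool := match pvFreq? d with | none => false | some f => ¬ f ≥ 10 ∧ f ≥ 4
def pvP2 (d : List (String × Int)) : Bool := match pvFreq? d with | none => false | some f => ¬ f ≥ 10 ∧ ¬ f ≥ 4 ∧ f ≥ 2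
def pvP3 (d : List (String × Int)) : Bool := match pvFreq? d with | none => false | some f => ¬ f ≥ 10 ∧ ¬ f ≥ 4 ∧ ¬ f ≥ 2

-- the foldl of pvStep fills the four buckets with the four filters
theorem pvStep_foldl (l : List (List (String × Int))) (c : List (List (String × Int)) × List (List (String × Int)) × List (List (String × Int)) × List (List (String × Int))) :
    l.foldl pvStep c = (c.1 ++ l.filter pvP0, c.2.1 ++ l.filter pvP1, c.2.2.1 ++ l.filter pvP2, c.2.2.2 ++ l.filter pvP3) := by
  induction l generalizing c with
  | nil => simp
  | cons x t ih =>
    simp only [List.foldl_cons, List.filter_cons, ih]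
    unfold pvStep pvP0 pvP1 pvP2 pvP3
    rcases hf : pvFreq? x with _ | f <;> simp <;> split_ifs <;> simp_all <;> omega

theorem pv_insertBy_filter_neg {α : Type} (b : α → α → Bool) (p : α → Bool) (x : α) (hx : p x = false) (ys : List α) :
    (PySem.List.insertBy b x ys).filter p = ys.filter p := by
  induction ys with
  | nil => simp [PySem.List.insertBy, hx]
  | cons e t ih =>
    simp only [PySem.List.insertBy]
    split <;> simp [List.filter_cons, hx, ih]

theorem pv_insertBy_front {α : Type} {key : α → Int} (x : α) (ys : List α)
    (h : ∀ e ∈ ys, key x < key e) :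
    PySem.List.insertBy (fun a c => decide (key a < key c)) x ys = x :: ys := by
  cases ys with
  | nil => rfl
  | cons e t => simp [PySem.List.insertBy, h e (by simp)]

theorem pv_insertBy_filter_pos {α : Type} {key : α → Int} (p : α → Bool) (x : α) (hx : p x = true) (ys : List α)
    (hs : ys.Pairwise (fun a c => key a ≤ key c)) :
    (PySem.List.insertBy (fun a c => decide (key a < key c)) x ys).filter p
      = PySem.List.insertBy (fun a c => decide (key a < key c)) x (ys.filter p) := by
  induction ys with
  | nil => simp [PySem.List.insertBy, hx]
  | cons e t ih =>
    rcases List.pairwise_cons.mp hs with ⟨he, ht⟩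
    rw [PySem.List.insertBy]
    by_cases hlt' : key x < key e
    · rw [if_pos (by simpa using hlt')]
      have hmem : ∀ y ∈ (e :: t).filter p, key x < key y := by
        intro y hy
        rcases List.mem_cons.mp (List.mem_filter.mp hy).1 with rfl | hy'
        · exact hlt'
        · exact lt_of_lt_of_le hlt' (he y hy')
      rw [pv_insertBy_front x ((e :: t).filter p) hmem]
      simp [List.filter_cons, hx]
    · rw [if_neg (by simpa using hlt')]
      cases hpe : p e with
      | true =>
        simp only [List.filter_cons, hpe, if_true, ih ht]
        rw [PySem.List.insertBy, if_neg (by simpa using hlt')]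
      | false => simp [hpe, ih ht]

theorem pv_insertBy_pairwise {α : Type} {key : α → Int} (x : α) (ys : List α)
    (hs : ys.Pairwise (fun a c => key a ≤ key c)) :
    (PySem.List.insertBy (fun a c => decide (key a < key c)) x ys).Pairwise (fun a c => key a ≤ key c) := by
  induction ys with
  | nil => simp [PySem.List.insertBy]
  | cons e t ih =>
    rcases List.pairwise_cons.mp hs with ⟨he, ht⟩
    rw [PySem.List.insertBy]
    split
    · rename_i hlt
      have hlt' : key x < key e := by simpa using hlt
      refine List.pairwise_cons.mpr ⟨?_, hs⟩
      intro y hy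
      rcases List.mem_cons.mp hy with rfl | hy'
      · exact le_of_lt hlt'
      · exact le_of_lt (lt_of_lt_of_le hlt' (he y hy'))
    · rename_i hnlt
      refine List.pairwise_cons.mpr ⟨?_, ih ht⟩
      intro y hy
      rcases (PySem.List.mem_insertBy _ _ _ _).mp hy with rfl | hy
      · simpa using hnlt
      · exact he y hy

theorem pv_foldl_insertBy_filter {α : Type} {key : α → Int} (p : α → Bool) (l : List α) (acc : List α)
    (hs : acc.Pairwise (fun a c => key a ≤ key c)) :
    (l.foldl (fun acc x => PySem.List.insertBy (fun a c => decide (key a < key c)) x acc) acc).filter p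
      = (l.filter p).foldl (fun acc x => PySem.List.insertBy (fun a c => decide (key a < key c)) x acc) (acc.filter p) := by
  induction l generalizing acc with
  | nil => simp
  | cons x t ih =>
    simp only [List.foldl_cons, List.filter_cons]
    rw [ih _ (pv_insertBy_pairwise x acc hs)]
    cases hx : p x with
    | true => rw [pv_insertBy_filter_pos p x hx acc hs]; simp
    | false => rw [pv_insertBy_filter_neg _ p x hx acc]; simp

-- filtering commutes with Python's stable sort
theorem pv_filter_sorted {α : Type} (key : α → Int) (p : α → Bool) (l : List α) :
    (PySem.List.sorted l key false).filter p = PySem.List.sorted (l.filter p) key false := by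
  rw [PySem.List.sorted_eq_foldl_insertBy, PySem.List.sorted_eq_foldl_insertBy]
  simpa using pv_foldl_insertBy_filter p l [] (by simp)

theorem pv_foldl_step_map (ideas : List (String × List (String × Int)))
    (c : List (List (String × Int)) × List (List (String × Int)) × List (List (String × Int)) × List (List (String × Int))) :
    ideas.foldl (fun c p => pvStep c p.2) c = (ideas.map (·.2)).foldl pvStep c := by
  rw [List.foldl_map]

-- on a data dict whose "frequency" key exists, A's predicates coincide with B's
theorem pv_pred_eq (d : List (String × Int)) (h : (pvFreq? d).isSome) :
    pvP0 d = decide (bFreq d ≥ 10) ∧ pvP1 d = decide (4 ≤ bFreq d ∧ bFreq d < 10)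
      ∧ pvP2 d = decide (2 ≤ bFreq d ∧ bFreq d < 4) ∧ pvP3 d = decide (bFreq d < 2) := by
  rcases hf : pvFreq? d with _ | f
  · simp [hf] at h
  · have hb : bFreq d = f := by
      simp only [bFreq, PySem.Dict.getD]
      simp only [pvFreq?] at hf
      simp [hf]
    unfold pvP0 pvP1 pvP2 pvP3
    rw [hf, hb]
    refine ⟨?_, ?_, ?_, ?_⟩ <;> (rw [decide_eq_decide]; try omega)

-- ===== VERDICT (by name: the statement is the Claim_ definition above) =====
theorem classify_ideas_spec : Claim_equal_classify_ideas := by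
  intro ideas _ hpre
  show classify_ideas ideas = classify_ideas_alt ideas
  unfold classify_ideas classify_ideas_alt
  rw [pv_foldl_step_map, pvStep_foldl]
  simp only [List.nil_append]
  have hkey : (fun x => -(bFreq x)) = pvKey := by funext x; rfl
  rw [hkey]
  have hmem : ∀ d ∈ PySem.List.sorted (ideas.map (·.2)) pvKey false, (pvFreq? d).isSome := by
    intro d hd
    rw [PySem.List.mem_sorted] at hd
    rcases List.mem_map.mp hd with ⟨p, hp, rfl⟩
    exact of_decide_eq_true (by
      have := (List.all_eq_true.mp hpre) p hp
      simpa using this)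
  rw [← pv_filter_sorted pvKey pvP0, ← pv_filter_sorted pvKey pvP1,
      ← pv_filter_sorted pvKey pvP2, ← pv_filter_sorted pvKey pvP3]
  rw [List.filter_congr (fun d hd => ((pv_pred_eq d (hmem d hd)).1).symm),
      List.filter_congr (fun d hd => ((pv_pred_eq d (hmem d hd)).2.1).symm),
      List.filter_congr (fun d hd => ((pv_pred_eq d (hmem d hd)).2.2.1).symm),
      List.filter_congr (fun d hd => ((pv_pred_eq d (hmem d hd)).2.2.2).symm)]
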